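-- pv_equiv track=rewrite | github.com/abolafiolopez/Ejercicios-Python | RetosMouredev/Anagrama/main.py | anagrama
-- ===== SOURCE A (Python) =====
-- def anagrama(string_1, string_2):
--
--     lista_palabra_1 = [letra for letra in string_1]
--     lista_palabra_2 = [letra for letra in string_2]
--
--     if sorted(string_1) != sorted(string_2):
--
--         return False
--
--     else:
--
--         for z in zip(lista_palabra_1, lista_palabra_2):
--
--             if z[0] == z[1]:
--                 return False
--
--         return True
-- ===== SOURCE B (Python) =====
-- def anagrama(string_1, string_2):
--     if len(string_1) != len(string_2):
--         return False
--     counts = {}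
--     for c1, c2 in zip(string_1, string_2):
--         if c1 == c2:
--             return False
--         counts[c1] = counts.get(c1, 0) + 1
--         counts[c2] = counts.get(c2, 0) - 1
--     return all(v == 0 for v in counts.values())
-- ===== Notes on version B (the rewrite author's own statement) =====
-- stated objective: faster
-- what changed: Replaces the two sorts with a single fused linear pass over zip(s1,s2) that both rejects any matching position immediately and accumulates a +1/-1 count-difference dict, checked for all-zero at the end.
import Mathlib
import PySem

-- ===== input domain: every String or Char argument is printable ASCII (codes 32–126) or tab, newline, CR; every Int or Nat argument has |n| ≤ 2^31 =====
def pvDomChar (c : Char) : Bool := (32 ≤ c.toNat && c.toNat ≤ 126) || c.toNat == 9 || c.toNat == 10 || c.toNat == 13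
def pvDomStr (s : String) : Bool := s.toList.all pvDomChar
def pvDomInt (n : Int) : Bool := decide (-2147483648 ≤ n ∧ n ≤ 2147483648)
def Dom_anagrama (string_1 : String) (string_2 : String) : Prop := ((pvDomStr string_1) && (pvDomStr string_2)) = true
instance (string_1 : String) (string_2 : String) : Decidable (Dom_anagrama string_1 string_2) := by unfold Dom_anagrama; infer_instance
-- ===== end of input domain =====

-- B replaces A's two sorts with one fused linear pass over zip(s1,s2) that rejects a
-- matching position at once and keeps a +1/-1 count-difference dict (objective: faster).

-- ===== PORT A =====
-- the 'for z in zip(...): if z[0] == z[1]: return False / return True' loop of A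
def anagramaLoopA : List (Char × Char) → Bool
  | [] => true
  | z :: t => if z.1 == z.2 then false else anagramaLoopA t

def anagrama (string_1 : String) (string_2 : String) : Bool :=
  let lista_palabra_1 := string_1.toList
  let lista_palabra_2 := string_2.toList
  if PySem.List.sorted string_1.toList (fun x => x) false ≠
      PySem.List.sorted string_2.toList (fun x => x) false then
    false
  else
    anagramaLoopA (lista_palabra_1.zip lista_palabra_2)

-- ===== PORT B =====
-- B's single for-loop: early 'return False' on a matching position is 'none';
-- counts[c1] = counts.get(c1, 0) + 1 / counts[c2] = counts.get(c2, 0) - 1 are the two modifies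
def anagramaLoopB : List (Char × Char) → PySem.Dict Char Int → Option (PySem.Dict Char Int)
  | [], counts => some counts
  | (c1, c2) :: t, counts =>
    if c1 == c2 then none
    else anagramaLoopB t ((counts.modify c1 0 (· + 1)).modify c2 0 (· - 1))

def anagrama_alt (string_1 : String) (string_2 : String) : Bool :=
  if string_1.toList.length ≠ string_2.toList.length then false
  else
    match anagramaLoopB (string_1.toList.zip string_2.toList) PySem.Dict.empty with
    | none => false
    | some counts => counts.values.all (fun v => v == 0)

-- ===== PRECONDITION & SPEC =====
def Spec_anagrama (string_1 : String) (string_2 : String) (out : Bool) : Prop := out = anagrama_alt string_1 string_2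
instance (string_1 : String) (string_2 : String) (out : Bool) : Decidable (Spec_anagrama string_1 string_2 out) := by unfold Spec_anagrama; infer_instance

-- ===== CLAIM (what is proved, stated in full; the proofs are below) =====
def Claim_equal_anagrama : Prop := ∀ (string_1 : String) (string_2 : String), Dom_anagrama string_1 string_2 → Spec_anagrama string_1 string_2 (anagrama string_1 string_2)

-- ===== LEMMAS AND PROOFS =====

-- the fold performed by B's loop when no position matches
def anagramaStep (d : PySem.Dict Char Int) (p : Char × Char) : PySem.Dict Char Int :=
  (d.modify p.1 0 (· + 1)).modify p.2 0 (· - 1)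

theorem anagramaLoopB_eq (zl : List (Char × Char)) (d : PySem.Dict Char Int) :
    anagramaLoopB zl d = if anagramaLoopA zl then some (zl.foldl anagramaStep d) else none := by
  induction zl generalizing d with
  | nil => rfl
  | cons z t ih =>
    obtain ⟨a, b⟩ := z
    simp only [anagramaLoopB, anagramaLoopA, List.foldl_cons]
    by_cases h : a == b
    · simp [h]
    · simp only [h, if_false, Bool.false_eq_true]
      exact ih _

theorem getD_foldl_anagramaStep (zl : List (Char × Char)) (d : PySem.Dict Char Int) (c : Char) :
    (zl.foldl anagramaStep d).getD c 0 =
      d.getD c 0 + ((zl.map Prod.fst).count c : Int) - ((zl.map Prod.snd).count c : Int) := by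
  induction zl generalizing d with
  | nil => simp
  | cons z t ih =>
    obtain ⟨a, b⟩ := z
    rw [List.foldl_cons, ih]
    have hstep : (anagramaStep d (a, b)).getD c 0 =
        d.getD c 0 + (if a == c then 1 else 0) - (if b == c then 1 else 0) := by
      simp only [anagramaStep, PySem.Dict.getD_modify]
      rcases eq_or_ne c a with rfl | ha
      · rcases eq_or_ne c b with rfl | hb
        · simp
        · simp [hb, Ne.symm hb]
      · rcases eq_or_ne c b with rfl | hb
        · simp [ha, Ne.symm ha]
        · simp [ha, hb, Ne.symm ha, Ne.symm hb]
    rw [hstep]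
    simp only [List.map_cons, List.count_cons]
    generalize d.getD c 0 = x
    generalize (List.count c (List.map Prod.fst t)) = m
    generalize (List.count c (List.map Prod.snd t)) = n
    split_ifs <;> push_cast <;> omega

theorem mem_keys_modify_iff (d : PySem.Dict Char Int) (k : Char) (d0 : Int) (f : Int → Int)
    (c : Char) : c ∈ (d.modify k d0 f).keys ↔ c = k ∨ c ∈ d.keys := by
  rw [PySem.Dict.keys_modify]; exact PySem.Dict.mem_keys_insert ..

theorem mem_keys_foldl_anagramaStep (zl : List (Char × Char)) (d : PySem.Dict Char Int) (c : Char) :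
    c ∈ (zl.foldl anagramaStep d).keys ↔ c ∈ d.keys ∨ c ∈ zl.map Prod.fst ∨ c ∈ zl.map Prod.snd := by
  induction zl generalizing d with
  | nil => simp
  | cons z t ih =>
    obtain ⟨a, b⟩ := z
    rw [List.foldl_cons, ih]
    simp only [anagramaStep, mem_keys_modify_iff, List.map_cons, List.mem_cons]
    tauto

theorem nodup_keys_foldl_anagramaStep (zl : List (Char × Char)) (d : PySem.Dict Char Int)
    (h : d.keys.Nodup) : (zl.foldl anagramaStep d).keys.Nodup := by
  induction zl generalizing d with
  | nil => exact h
  | cons z t ih =>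
    refine ih _ ?_
    simp only [anagramaStep, PySem.Dict.keys_modify]
    exact PySem.Dict.nodup_keys_insert _ _ _ (PySem.Dict.nodup_keys_insert _ _ _ h)

-- for equal-length strings, B's all-zero counter test says exactly "same multiset"
theorem values_all_zero_iff (l1 l2 : List Char) (hlen : l1.length = l2.length) :
    ((l1.zip l2).foldl anagramaStep PySem.Dict.empty).values.all (fun v => v == 0) = true ↔
      ∀ c : Char, l1.count c = l2.count c := by
  have hfst : (l1.zip l2).map Prod.fst = l1 := List.map_fst_zip (le_of_eq hlen)
  have hsnd : (l1.zip l2).map Prod.snd = l2 := List.map_snd_zip (le_of_eq hlen.symm)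
  have hnd : ((l1.zip l2).foldl anagramaStep PySem.Dict.empty).keys.Nodup :=
    nodup_keys_foldl_anagramaStep _ _ (by simp)
  rw [PySem.Dict.values_eq_map_keys _ hnd 0]
  simp only [List.all_eq_true, List.mem_map, forall_exists_index, and_imp,
    forall_apply_eq_imp_iff₂, beq_iff_eq]
  constructor
  · intro h c
    by_cases hc : c ∈ ((l1.zip l2).foldl anagramaStep PySem.Dict.empty).keys
    · have := h c hc
      rw [getD_foldl_anagramaStep, hfst, hsnd] at this
      simp only [PySem.Dict.getD_empty, zero_add] at this
      omega
    · rw [mem_keys_foldl_anagramaStep, hfst, hsnd] at hc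
      push Not at hc
      simp [List.count_eq_zero_of_not_mem hc.2.1, List.count_eq_zero_of_not_mem hc.2.2]
  · intro h c _
    rw [getD_foldl_anagramaStep, hfst, hsnd]
    simp only [PySem.Dict.getD_empty, zero_add]
    have := h c
    omega
-- ===== VERDICT (by name: the statement is the Claim_ definition above) =====
theorem anagrama_spec : Claim_equal_anagrama := by
  intro s1 s2 _
  unfold Spec_anagrama anagrama anagrama_alt
  by_cases hlen : s1.toList.length = s2.toList.length
  · rw [anagramaLoopB_eq]
    cases hA : anagramaLoopA (s1.toList.zip s2.toList)
    · simp only [hA, Bool.false_eq_true, if_false, hlen, ne_eq, not_true_eq_false]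
      split <;> rfl
    · simp only [hA, if_true, hlen, ne_eq, not_true_eq_false, if_false]
      have hiff := values_all_zero_iff s1.toList s2.toList hlen
      by_cases hs : PySem.List.sorted s1.toList (fun x => x) false =
          PySem.List.sorted s2.toList (fun x => x) false
      · have hperm := (PySem.List.sorted_id_eq_sorted_id_iff_perm _ _).mp hs
        rw [if_neg (by simp [hs]), Eq.symm (hiff.mpr (fun c => hperm.count_eq c))]
      · rw [if_pos hs]
        by_contra hv
        exact hs ((PySem.List.sorted_id_eq_sorted_id_iff_perm _ _).mpr
          (List.perm_iff_count.mpr (hiff.mp (by revert hv; cases ((s1.toList.zip s2.toList).foldl anagramaStep PySem.Dict.empty).values.all (fun v => v == 0) <;> simp))))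
  · have hslen : PySem.List.sorted s1.toList (fun x => x) false ≠
        PySem.List.sorted s2.toList (fun x => x) false := fun hs =>
      hlen (by simpa [PySem.List.length_sorted] using congrArg List.length hs)
    rw [if_pos hslen, if_pos hlen]
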